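-- pv_equiv track=rewrite | github.com/uriberger/reserach_methods_in_software_engineering | code_snippet7.py | short_code_snippet7
-- ===== SOURCE A (Python) =====
-- import math
--
-- def short_code_snippet7(my_str, indices):
--     best_start_index = -1
--     smallest_gap = math.inf
--     for start_index in indices:
--         cur_smallest_gap = math.inf
--         for end_index in indices:
--             if (
--                 end_index - start_index > 0
--                 and end_index - start_index < cur_smallest_gap
--             ):
--                 cur_smallest_gap = end_index - start_index
--         if cur_smallest_gap < smallest_gap:
--             best_start_index = start_index
--             smallest_gap = cur_smallest_gap
--
--     return my_str[best_start_index : best_start_index + smallest_gap]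
-- ===== SOURCE B (Python) =====
-- def short_code_snippet7(my_str, indices):
--     vals = sorted(set(indices))
--     smallest_gap = min(b - a for a, b in zip(vals, vals[1:]))
--     value_set = set(vals)
--     best_start_index = next(s for s in indices if s + smallest_gap in value_set)
--     return my_str[best_start_index : best_start_index + smallest_gap]
-- ===== Notes on version B (the rewrite author's own statement) =====
-- stated objective: faster
-- what changed: Replaces A's O(n^2) all-pairs nested scan by sorting the distinct indices once: the smallest positive gap is the minimum consecutive difference of the sorted distinct values, and the best start is the first index s (in original order) with s+gap also among the indices.
import Mathlib
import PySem

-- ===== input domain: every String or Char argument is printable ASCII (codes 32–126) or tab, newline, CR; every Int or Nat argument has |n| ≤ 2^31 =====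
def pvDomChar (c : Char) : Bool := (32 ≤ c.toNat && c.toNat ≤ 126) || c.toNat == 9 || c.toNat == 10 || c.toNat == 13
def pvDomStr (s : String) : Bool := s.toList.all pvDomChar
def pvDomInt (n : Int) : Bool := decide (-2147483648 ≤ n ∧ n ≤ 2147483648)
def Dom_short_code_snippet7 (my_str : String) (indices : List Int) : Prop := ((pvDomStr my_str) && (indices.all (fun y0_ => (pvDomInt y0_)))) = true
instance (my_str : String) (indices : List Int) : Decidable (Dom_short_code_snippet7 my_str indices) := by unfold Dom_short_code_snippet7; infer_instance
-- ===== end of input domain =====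

-- B replaces A's O(n^2) nested scan by sorting the distinct indices once (objective: faster).

-- ===== PORT A =====
-- 'x < y' where either side may be Python's math.inf (modelled as none): inf is
-- greater than every int and 'inf < inf' is False — exact for the values A compares.
def pyLtInf (a b : Option Int) : Bool :=
  match a, b with
  | none, _ => false
  | some _, none => true
  | some x, some y => decide (x < y)

-- A's inner 'for end_index in indices' loop (cur_smallest_gap starts at inf = none)
def innerLoop (indices : List Int) (start_index : Int) : Option Int :=
  indices.foldl
    (fun cur end_index =>
      if 0 < end_index - start_index ∧ pyLtInf (some (end_index - start_index)) cur = true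
      then some (end_index - start_index) else cur)
    none

-- A's outer loop: state (best_start_index, smallest_gap)
def outerLoop (indices : List Int) : Int × Option Int :=
  indices.foldl
    (fun st start_index =>
      let cur := innerLoop indices start_index
      if pyLtInf cur st.2 = true then (start_index, cur) else st)
    (-1, none)

def short_code_snippet7 (my_str : String) (indices : List Int) : String :=
  let st := outerLoop indices
  match st.2 with
  | some g => PySem.Str.slice my_str (some st.1) (some (st.1 + g))
  | none => ""  -- here Python raises TypeError (slice bound -1 + math.inf); outside Pre_

-- ===== PORT B =====
-- gaps between consecutive elements: [b - a for a, b in zip(vals, vals[1:])]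
def consecGaps (vals : List Int) : List Int :=
  (vals.zip vals.tail).map (fun p => p.2 - p.1)

def short_code_snippet7_alt (my_str : String) (indices : List Int) : String :=
  let vals := PySem.List.sorted (PySem.Set.ofList indices) (fun x => x) false
  match PySem.List.min? (consecGaps vals) (fun x => x) with
  | none => ""  -- Python's min() of an empty generator raises ValueError; outside Pre_
  | some g =>
    let value_set := PySem.Set.ofList vals
    match indices.find? (fun s => value_set.contains (s + g)) with
    | some best => PySem.Str.slice my_str (some best) (some (best + g))
    | none => ""  -- next() would raise StopIteration; unreachable under Pre_

-- ===== PRECONDITION & SPEC =====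
-- Pre_ excludes exactly the inputs with no strictly increasing pair of indices
-- (fewer than two distinct values): there A's smallest_gap stays math.inf and the
-- final slice raises TypeError, so A returns no value.
def Pre_short_code_snippet7 (my_str : String) (indices : List Int) : Prop :=
  ∃ a ∈ indices, ∃ b ∈ indices, a < b

instance (my_str : String) (indices : List Int) : Decidable (Pre_short_code_snippet7 my_str indices) := by
  unfold Pre_short_code_snippet7; infer_instance

def pvWitness_short_code_snippet7 : String × List Int := ("abcdef", [0, 2, 3])

def Spec_short_code_snippet7 (my_str : String) (indices : List Int) (out : String) : Prop := out = short_code_snippet7_alt my_str indices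
instance (my_str : String) (indices : List Int) (out : String) : Decidable (Spec_short_code_snippet7 my_str indices out) := by unfold Spec_short_code_snippet7; infer_instance

-- ===== CLAIM (what is proved, stated in full; the proofs are below) =====
def Claim_equal_short_code_snippet7 : Prop := ∀ (my_str : String) (indices : List Int), Dom_short_code_snippet7 my_str indices → Pre_short_code_snippet7 my_str indices → Spec_short_code_snippet7 my_str indices (short_code_snippet7 my_str indices)

-- ===== LEMMAS AND PROOFS =====

theorem inner_go (s : Int) (l : List Int) : ∀ (acc : Option Int),
    (l.foldl (fun cur e => if 0 < e - s ∧ pyLtInf (some (e - s)) cur = true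
                then some (e - s) else cur) acc = acc
       ∧ ∀ e ∈ l, s < e → pyLtInf (some (e - s)) acc = false)
  ∨ (∃ v, l.foldl (fun cur e => if 0 < e - s ∧ pyLtInf (some (e - s)) cur = true
                then some (e - s) else cur) acc = some v
       ∧ pyLtInf (some v) acc = true
       ∧ (∃ e ∈ l, s < e ∧ e - s = v)
       ∧ ∀ e ∈ l, s < e → v ≤ e - s) := by
  induction l with
  | nil => intro acc; left; simp
  | cons e0 t ih =>
    intro acc
    simp only [List.foldl_cons]
    by_cases hc : 0 < e0 - s ∧ pyLtInf (some (e0 - s)) acc = true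
    · rw [if_pos hc]
      rcases ih (some (e0 - s)) with ⟨heq, hbd⟩ | ⟨v, heq, hlt, ⟨e, he, hse, hev⟩, hbd⟩
      · right
        refine ⟨e0 - s, heq, hc.2, ⟨e0, by simp, by omega, rfl⟩, ?_⟩
        intro e he hse
        rcases List.mem_cons.mp he with he | he
        · omega
        · have := hbd e he hse
          simp [pyLtInf] at this; omega
      · right
        have hvlt : v < e0 - s := by simpa [pyLtInf] using hlt
        refine ⟨v, heq, ?_, ⟨e, by simp [he], hse, hev⟩, ?_⟩
        · cases acc with
          | none => simp [pyLtInf]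
          | some c =>
            have : e0 - s < c := by simpa [pyLtInf] using hc.2
            simp [pyLtInf]; omega
        · intro e' he' hse'
          rcases List.mem_cons.mp he' with he' | he'
          · omega
          · exact hbd e' he' hse'
    · rw [if_neg hc]
      rcases ih acc with ⟨heq, hbd⟩ | ⟨v, heq, hlt, ⟨e, he, hse, hev⟩, hbd⟩
      · left
        refine ⟨heq, ?_⟩
        intro e he hse
        rcases List.mem_cons.mp he with he | he
        · subst he
          rcases Bool.eq_false_or_eq_true (pyLtInf (some (e - s)) acc) with h | h
          · exact absurd ⟨by omega, h⟩ hc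
          · exact h
        · exact hbd e he hse
      · right
        refine ⟨v, heq, hlt, ⟨e, by simp [he], hse, hev⟩, ?_⟩
        intro e' he' hse'
        rcases List.mem_cons.mp he' with he' | he'
        · subst he'
          by_contra hlt2
          push Not at hlt2
          cases acc with
          | none => exact absurd ⟨by omega, by simp [pyLtInf]⟩ hc
          | some c =>
            have hvc : v < c := by simpa [pyLtInf] using hlt
            exact absurd ⟨by omega, by simp [pyLtInf]; omega⟩ hc
        · exact hbd e' he' hse'

theorem inner_none (I : List Int) (s : Int) :
    innerLoop I s = none ↔ ∀ e ∈ I, ¬ s < e := by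
  constructor
  · intro h e he hse
    rcases inner_go s I none with ⟨heq, hbd⟩ | ⟨v, heq, _⟩
    · have := hbd e he hse; simp [pyLtInf] at this
    · rw [innerLoop] at h; rw [h] at heq; simp at heq
  · intro h
    rcases inner_go s I none with ⟨heq, hbd⟩ | ⟨v, heq, _, ⟨e, he, hse, _⟩, _⟩
    · exact heq
    · exact absurd hse (h e he)

theorem inner_some (I : List Int) (s v : Int) (h : innerLoop I s = some v) :
    (∃ e ∈ I, s < e ∧ e - s = v) ∧ ∀ e ∈ I, s < e → v ≤ e - s := by
  rcases inner_go s I none with ⟨heq, hbd⟩ | ⟨v', heq, _, hat, hbd⟩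
  · rw [innerLoop] at h; rw [h] at heq; simp at heq
  · rw [innerLoop] at h; rw [h] at heq
    obtain rfl : v' = v := by injection heq.symm
    exact ⟨hat, hbd⟩

theorem outer_go (I : List Int) (l : List Int) : ∀ (st : Int × Option Int),
    (l.foldl (fun st s => let cur := innerLoop I s;
        if pyLtInf cur st.2 = true then (s, cur) else st) st = st
       ∧ ∀ s ∈ l, pyLtInf (innerLoop I s) st.2 = false)
  ∨ (∃ b g, l.foldl (fun st s => let cur := innerLoop I s;
        if pyLtInf cur st.2 = true then (s, cur) else st) st = (b, some g)
       ∧ pyLtInf (some g) st.2 = true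
       ∧ innerLoop I b = some g
       ∧ (∀ s ∈ l, pyLtInf (innerLoop I s) (some g) = false)
       ∧ l.find? (fun s => innerLoop I s == some g) = some b) := by
  induction l with
  | nil => intro st; left; simp
  | cons s0 t ih =>
    intro st
    simp only [List.foldl_cons]
    by_cases hc : pyLtInf (innerLoop I s0) st.2 = true
    · rw [if_pos hc]
      obtain ⟨g0, hg0⟩ : ∃ g0, innerLoop I s0 = some g0 := by
        cases h : innerLoop I s0 with
        | none => rw [h] at hc; simp [pyLtInf] at hc
        | some g0 => exact ⟨g0, rfl⟩
      rcases ih (s0, innerLoop I s0) with ⟨heq, hbd⟩ | ⟨b, g, heq, hlt, hib, hbd, hfind⟩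
      · right
        refine ⟨s0, g0, by rw [heq]; simp [hg0], by rw [← hg0]; exact hc, hg0, ?_, ?_⟩
        · intro s hs
          rcases List.mem_cons.mp hs with rfl | hs
          · rw [hg0]; simp [pyLtInf]
          · have := hbd s hs; rw [hg0] at this; exact this
        · rw [List.find?_cons_of_pos (by simp [hg0])]
      · right
        have hgg0 : g < g0 := by rw [hg0] at hlt; simpa [pyLtInf] using hlt
        refine ⟨b, g, heq, ?_, hib, ?_, ?_⟩
        · cases h2 : st.2 with
          | none => simp [pyLtInf]
          | some c =>
            rw [h2] at hc; rw [hg0] at hc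
            have : g0 < c := by simpa [pyLtInf] using hc
            simp [pyLtInf]; omega
        · intro s hs
          rcases List.mem_cons.mp hs with rfl | hs
          · rw [hg0]; simp [pyLtInf]; omega
          · exact hbd s hs
        · rw [List.find?_cons_of_neg (by simp [hg0]; omega)]; exact hfind
    · rw [if_neg hc]
      rcases ih st with ⟨heq, hbd⟩ | ⟨b, g, heq, hlt, hib, hbd, hfind⟩
      · left
        refine ⟨heq, ?_⟩
        intro s hs
        rcases List.mem_cons.mp hs with rfl | hs
        · exact Bool.not_eq_true _ ▸ (by simpa using hc)
        · exact hbd s hs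
      · right
        refine ⟨b, g, heq, hlt, hib, ?_, ?_⟩
        · intro s hs
          rcases List.mem_cons.mp hs with rfl | hs
          · -- show pyLtInf (innerLoop I s) (some g) = false
            cases h : innerLoop I s with
            | none => simp [pyLtInf]
            | some v =>
              simp only [pyLtInf]; simp only [decide_eq_false_iff_not]
              intro hvg
              apply hc
              cases h2 : st.2 with
              | none => rw [h]; simp [pyLtInf]
              | some c =>
                have hgc : g < c := by rw [h2] at hlt; simpa [pyLtInf] using hlt
                rw [h]; simp [pyLtInf]; omega
          · exact hbd s hs
        · rw [List.find?_cons_of_neg]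
          · exact hfind
          · simp only [beq_iff_eq]
            intro h
            apply hc
            rw [h]
            cases h2 : st.2 with
            | none => simp [pyLtInf]
            | some c =>
              have hgc : g < c := by rw [h2] at hlt; simpa [pyLtInf] using hlt
              simp [pyLtInf]; omega

theorem pairwise_zip_tail {R : Int → Int → Prop} (l : List Int) (h : l.Pairwise R) :
    ∀ p ∈ l.zip l.tail, R p.1 p.2 := by
  induction l with
  | nil => simp
  | cons x t ih =>
    cases t with
    | nil => simp
    | cons y t' =>
      intro p hp
      rcases List.mem_cons.mp hp with rfl | hp
      · exact (List.pairwise_cons.mp h).1 y (by simp)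
      · exact ih (List.pairwise_cons.mp h).2 p hp

theorem consec_le_pair (vals : List Int) (h : vals.Pairwise (· < ·)) :
    ∀ a ∈ vals, ∀ c ∈ vals, a < c → ∃ d ∈ consecGaps vals, d ≤ c - a := by
  induction vals with
  | nil => simp
  | cons x t ih =>
    intro a ha c hc hac
    rcases List.pairwise_cons.mp h with ⟨hx, ht⟩
    rcases List.mem_cons.mp ha with rfl | ha2
    · -- a = x, so c ∈ t (c ≠ x since a < c)
      have hct : c ∈ t := by
        rcases List.mem_cons.mp hc with rfl | hc
        · omega
        · exact hc
      cases t with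
      | nil => simp at hct
      | cons y t' =>
        refine ⟨y - a, by simp [consecGaps], ?_⟩
        have : y ≤ c := by
          rcases List.mem_cons.mp hct with rfl | hct
          · omega
          · have := (List.pairwise_cons.mp ht).1 c hct; omega
        omega
    · have hct : c ∈ t := by
        rcases List.mem_cons.mp hc with rfl | hc2
        · have := hx a ha2; omega
        · exact hc2
      obtain ⟨d, hd, hdle⟩ := ih ht a ha2 c hct hac
      refine ⟨d, ?_, hdle⟩
      cases t with
      | nil => simp [consecGaps] at hd
      | cons y t' => simp [consecGaps] at hd ⊢; tauto

theorem mem_consecGaps (vals : List Int) (h : vals.Pairwise (· < ·)) (d : Int)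
    (hd : d ∈ consecGaps vals) : ∃ a ∈ vals, ∃ c ∈ vals, a < c ∧ d = c - a := by
  rcases List.mem_map.mp hd with ⟨p, hp, rfl⟩
  have h1 := (List.of_mem_zip hp).1
  have h2 := List.tail_subset _ (List.of_mem_zip hp).2
  exact ⟨p.1, h1, p.2, h2, pairwise_zip_tail vals h p hp, rfl⟩

theorem find?_congr_mem {p q : Int → Bool} (l : List Int)
    (h : ∀ x ∈ l, p x = q x) : l.find? p = l.find? q := by
  induction l with
  | nil => rfl
  | cons x t ih =>
    have hx := h x (by simp)
    by_cases hp : p x = true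
    · rw [List.find?_cons_of_pos hp, List.find?_cons_of_pos (hx ▸ hp)]
    · rw [List.find?_cons_of_neg hp, List.find?_cons_of_neg (hx ▸ hp)]
      exact ih (fun y hy => h y (by simp [hy]))

-- ===== VERDICT (by name: the statement is the Claim_ definition above) =====
theorem short_code_snippet7_spec : Claim_equal_short_code_snippet7 := by
  intro my_str I _hdom hpre
  obtain ⟨a, haI, c, hcI, hac⟩ := hpre
  unfold Spec_short_code_snippet7
  set vals := PySem.List.sorted (PySem.Set.ofList I) (fun x => x) false with hvals
  have hmemv : ∀ x : Int, x ∈ vals ↔ x ∈ I := fun x =>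
    (PySem.List.mem_sorted _ _ _ x).trans (PySem.Set.mem_ofList I x)
  have hpw : vals.Pairwise (· < ·) := PySem.List.sorted_ofList_pairwise_lt I
  -- a helper: any s ∈ I with something greater has inner some
  have hinner_ex : ∀ s : Int, (∃ e ∈ I, s < e) → ∃ v, innerLoop I s = some v := by
    intro s ⟨e, heI, hse⟩
    cases h : innerLoop I s with
    | none => exact absurd hse ((inner_none I s).mp h e heI)
    | some v => exact ⟨v, rfl⟩
  -- the outer loop ends in the updated state
  rcases outer_go I I (-1, none) with ⟨_, hbd⟩ | ⟨b0, g0, heq, _, hib0, hbd, hfind⟩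
  · obtain ⟨v, hv⟩ := hinner_ex a ⟨c, hcI, hac⟩
    have := hbd a haI
    rw [hv] at this
    simp [pyLtInf] at this
  have houter : outerLoop I = (b0, some g0) := heq
  -- g0 is positive
  obtain ⟨⟨e0, he0I, hbe0, he0g⟩, _⟩ := inner_some I b0 g0 hib0
  have hg0pos : 0 < g0 := by omega
  have hb0I : b0 ∈ I := List.mem_of_find?_eq_some hfind
  -- g0 is a lower bound on all consecutive gaps of vals
  have gapsLB : ∀ d ∈ consecGaps vals, g0 ≤ d := by
    intro d hd
    obtain ⟨a', ha', c', hc', hlt, rfl⟩ := mem_consecGaps vals hpw d hd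
    have ha'I := (hmemv a').mp ha'
    have hc'I := (hmemv c').mp hc'
    obtain ⟨v, hv⟩ := hinner_ex a' ⟨c', hc'I, hlt⟩
    have hlb := hbd a' ha'I
    rw [hv] at hlb
    have hg0v : g0 ≤ v := by simp [pyLtInf] at hlb; omega
    have := (inner_some I a' v hv).2 c' hc'I hlt
    omega
  -- g0 is attained as a consecutive gap
  have hg0mem : g0 ∈ consecGaps vals := by
    obtain ⟨d, hd, hdle⟩ := consec_le_pair vals hpw b0 ((hmemv b0).mpr hb0I) e0 ((hmemv e0).mpr he0I) hbe0
    have := gapsLB d hd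
    have : d = g0 := by omega
    exact this ▸ hd
  -- B's min is g0
  have hmin : PySem.List.min? (consecGaps vals) (fun x => x) = some g0 := by
    cases h : PySem.List.min? (consecGaps vals) (fun x => x) with
    | none =>
      rw [PySem.List.min?_eq_none_iff] at h
      rw [h] at hg0mem; simp at hg0mem
    | some m =>
      have hm1 : m ∈ consecGaps vals := PySem.List.min?_mem h
      have hm2 : (fun x : Int => x) m ≤ (fun x : Int => x) g0 := PySem.List.min?_isMin h g0 hg0mem
      have := gapsLB m hm1
      simp only at hm2
      have : m = g0 := by omega
      rw [this]
  -- B's find? agrees with A's characterization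
  have hcont : ∀ (l : PySem.Set Int) (x : Int), l.contains x = decide (x ∈ l) := by
    intro l x; simp [PySem.Set.contains]
  have hpt : ∀ s ∈ I, ((PySem.Set.ofList vals).contains (s + g0)) = (innerLoop I s == some g0) := by
    intro s hsI
    cases h : innerLoop I s with
    | none =>
      have hno := (inner_none I s).mp h
      rw [hcont, show (none == some g0 : Bool) = false from rfl]
      simp only [decide_eq_false_iff_not]
      intro hmem
      have : s + g0 ∈ vals := (PySem.Set.mem_ofList vals _).mp hmem
      exact hno (s + g0) ((hmemv _).mp this) (by omega)
    | some v =>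
      obtain ⟨⟨e, heI, hse, hev⟩, hvbd⟩ := inner_some I s v h
      have hlb := hbd s hsI
      rw [h] at hlb
      have hg0v : g0 ≤ v := by simp [pyLtInf] at hlb; omega
      by_cases hveq : v = g0
      · subst hveq
        rw [hcont, show (some v == some v : Bool) = true by simp]
        simp only [decide_eq_true_eq]
        exact (PySem.Set.mem_ofList vals _).mpr ((hmemv _).mpr (by rw [show s + v = e by omega]; exact heI))
      · rw [hcont, show (some v == some g0 : Bool) = false by simp [hveq]]
        simp only [decide_eq_false_iff_not]
        intro hmem
        have hsg : s + g0 ∈ I := (hmemv _).mp ((PySem.Set.mem_ofList vals _).mp hmem)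
        have := hvbd (s + g0) hsg (by omega)
        omega
  have hfindB : I.find? (fun s => (PySem.Set.ofList vals).contains (s + g0)) = some b0 := by
    rw [find?_congr_mem I hpt]; exact hfind
  -- assemble
  show short_code_snippet7 my_str I = short_code_snippet7_alt my_str I
  rw [short_code_snippet7, short_code_snippet7_alt]
  simp only [houter, ← hvals, hmin, hfindB]
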